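-- pv_equiv track=rewrite | github.com/toyasama/Domino | domino.py | domino_score
-- ===== SOURCE A (Python) =====
-- import itertools
--
-- def count_numbers(piece,snake):
--     count_dict = {}
--     for i in range(7):
--         count = 0
--         for domino1,domino2 in itertools.zip_longest(piece,snake,fillvalue=[]) :
--             count += domino1.count(i) + domino2.count(i)
--         count_dict[i] = count
--
--     return count_dict
--
-- def domino_score(piece,snake):
--     number_dict = count_numbers(piece,snake)
--     score_list = []
--
--     for domino in piece :
--         score = 0
--         for i in domino :
--             score += number_dict[i]
--         score_list.append((score,domino))
--     score_list.sort(reverse=True)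
--     return score_list
-- ===== SOURCE B (Python) =====
-- import itertools
--
-- def domino_score(piece, snake):
--     # Counting by sorting instead of scanning: sort all pips of both lists once,
--     # read off each value's frequency as the length of its run (itertools.groupby),
--     # record the runs for the tracked pip values 0..6, then score each piece
--     # domino by lookup and reverse-sort the score list.
--     freq = dict.fromkeys(range(7), 0)
--     for pip, run in itertools.groupby(sorted(p for d in piece + snake for p in d)):
--         if pip in freq:
--             freq[pip] = sum(1 for _ in run)
--     return sorted(((sum(freq[p] for p in d), d) for d in piece), reverse=True)
-- ===== Notes on version B (the rewrite author's own statement) =====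
-- stated objective: alternative
-- what changed: Counts pip frequencies by sorting: B sorts all pips of piece and snake once and reads each value's frequency as the length of its run (itertools.groupby), recording runs for the tracked values 0..6, instead of A's seven zip_longest scans (one .count pass per pip value); scoring lookup and reverse sort are kept.
import Mathlib
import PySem

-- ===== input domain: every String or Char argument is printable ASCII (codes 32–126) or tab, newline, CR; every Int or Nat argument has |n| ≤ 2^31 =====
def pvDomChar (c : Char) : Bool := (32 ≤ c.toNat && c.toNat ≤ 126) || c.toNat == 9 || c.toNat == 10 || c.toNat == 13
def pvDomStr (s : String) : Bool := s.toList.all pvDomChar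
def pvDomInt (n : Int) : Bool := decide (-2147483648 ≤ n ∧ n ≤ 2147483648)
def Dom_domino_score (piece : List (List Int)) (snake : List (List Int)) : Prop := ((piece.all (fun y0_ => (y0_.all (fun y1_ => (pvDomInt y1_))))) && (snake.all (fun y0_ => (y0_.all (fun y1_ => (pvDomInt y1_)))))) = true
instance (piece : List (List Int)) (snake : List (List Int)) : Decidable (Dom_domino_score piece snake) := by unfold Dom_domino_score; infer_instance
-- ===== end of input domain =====

-- B counts pip frequencies by sorting all pips once and reading run lengths
-- (groupby), instead of A's seven zip_longest counting scans; same return value.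

-- shared port of Python's builtin list sort with reverse=True on (int, list[int])
-- tuples: stable insertion sort under Python's lexicographic tuple/list comparison
-- (exact: Python compares tuples and lists lexicographically, ints by <).
def pyListLt : List Int → List Int → Bool
  | [], [] => false
  | [], _ :: _ => true
  | _ :: _, [] => false
  | a :: as, b :: bs => if a < b then true else if b < a then false else pyListLt as bs

def pyTupLt (x y : Int × List Int) : Bool :=
  if x.1 < y.1 then true else if y.1 < x.1 then false else pyListLt x.2 y.2

def pySortRev (xs : List (Int × List Int)) : List (Int × List Int) :=
  xs.foldl (fun acc x => PySem.List.insertBy (fun a b => pyTupLt b a) x acc) []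

-- ===== PORT A =====
-- itertools.zip_longest(piece, snake, fillvalue=[])
def zipLongest : List (List Int) → List (List Int) → List (List Int × List Int)
  | [], [] => []
  | x :: xs, [] => (x, ([] : List Int)) :: zipLongest xs []
  | [], y :: ys => (([] : List Int), y) :: zipLongest [] ys
  | x :: xs, y :: ys => (x, y) :: zipLongest xs ys

def count_numbers (piece : List (List Int)) (snake : List (List Int)) : PySem.Dict Int Int :=
  (PySem.List.pyRange 0 7 1).foldl
    (fun d i =>
      d.insert i ((zipLongest piece snake).foldl
        (fun c pr => c + ((pr.1.count i : Int) + (pr.2.count i : Int))) 0))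
    PySem.Dict.empty

def domino_score (piece : List (List Int)) (snake : List (List Int)) : List (Int × List Int) :=
  -- number_dict[i] → getD: total form, key present under Pre_ (Python raises KeyError outside Pre_)
  pySortRev (piece.foldl
    (fun acc domino =>
      acc ++ [(domino.foldl (fun s i => s + (count_numbers piece snake).getD i 0) 0, domino)]) [])

-- ===== PORT B =====
-- itertools.groupby on a list of ints: the (key, group length) runs, left to right
def groupRunsGo (x : Int) (c : Int) : List Int → List (Int × Int)
  | [] => [(x, c)]
  | y :: ys => if y == x then groupRunsGo x (c + 1) ys else (x, c) :: groupRunsGo y 1 ys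

def groupRuns : List Int → List (Int × Int)
  | [] => []
  | x :: xs => groupRunsGo x 1 xs

def domino_score_alt (piece : List (List Int)) (snake : List (List Int)) : List (Int × List Int) :=
  -- freq = dict.fromkeys(range(7), 0); sorted pool; guarded run recording; score; reverse sort
  let freq0 := (PySem.List.pyRange 0 7 1).foldl (fun d i => d.insert i (0 : Int)) PySem.Dict.empty
  let pool := PySem.List.sorted ((piece ++ snake).flatten) (fun p => p) false
  let freq := (groupRuns pool).foldl
    (fun d kr => if d.contains kr.1 then d.insert kr.1 kr.2 else d) freq0
  -- freq[p] → getD: total form, key present under Pre_ (Python raises KeyError outside Pre_)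
  pySortRev (piece.map (fun domino =>
    (domino.foldl (fun s p => s + freq.getD p 0) 0, domino)))

-- ===== PRECONDITION & SPEC =====
-- Pre_ excludes exactly the inputs on which A raises KeyError: a pip of a piece
-- domino outside 0..6 (count_numbers only has keys 0..6).
def Pre_domino_score (piece : List (List Int)) (snake : List (List Int)) : Prop :=
  ∀ domino ∈ piece, ∀ p ∈ domino, 0 ≤ p ∧ p ≤ 6
instance (piece : List (List Int)) (snake : List (List Int)) : Decidable (Pre_domino_score piece snake) := by unfold Pre_domino_score; infer_instance

def pvWitness_domino_score : List (List Int) × List (List Int) := ([[0, 1], [2, 2], [6, 0]], [[3, 4], [0, 6]])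

def Spec_domino_score (piece : List (List Int)) (snake : List (List Int)) (out : List (Int × List Int)) : Prop := out = domino_score_alt piece snake
instance (piece : List (List Int)) (snake : List (List Int)) (out : List (Int × List Int)) : Decidable (Spec_domino_score piece snake out) := by unfold Spec_domino_score; infer_instance

-- ===== CLAIM (what is proved, stated in full; the proofs are below) =====
def Claim_equal_domino_score : Prop := ∀ (piece : List (List Int)) (snake : List (List Int)), Dom_domino_score piece snake → Pre_domino_score piece snake → Spec_domino_score piece snake (domino_score piece snake)

-- ===== LEMMAS AND PROOFS =====

-- A's dict: fold of key-determined inserts over a list of keys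
theorem getD_foldl_insert_fun (l : List Int) (f : Int → Int) (d0 : PySem.Dict Int Int) (k : Int) :
    (l.foldl (fun d i => d.insert i (f i)) d0).getD k 0
      = if k ∈ l then f k else d0.getD k 0 := by
  induction l generalizing d0 with
  | nil => simp
  | cons i l ih =>
    simp only [List.foldl_cons, ih, List.mem_cons]
    by_cases hl : k ∈ l
    · simp [hl]
    · by_cases hk : k = i
      · simp [hk, PySem.Dict.getD_insert_self]
      · simp [hl, hk, PySem.Dict.getD_insert_of_ne d0 (f i) 0 hk]

-- A's inner zip_longest loop counts k over both lists of dominoes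
theorem zipLongest_count (xs ys : List (List Int)) (k : Int) (init : Int) :
    (zipLongest xs ys).foldl (fun c pr => c + ((pr.1.count k : Int) + (pr.2.count k : Int))) init
      = init + (xs.flatten.count k : Int) + (ys.flatten.count k : Int) := by
  induction xs generalizing ys init with
  | nil =>
    induction ys generalizing init with
    | nil => simp [zipLongest]
    | cons y ys ihy =>
      simp only [zipLongest, List.foldl_cons, ihy, List.flatten_cons, List.count_append, List.count_nil]
      push_cast [List.count_nil, List.flatten_nil]; ring
  | cons x xs ihx =>
    cases ys with
    | nil =>
      simp only [zipLongest, List.foldl_cons, ihx, List.flatten_cons, List.count_append]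
      push_cast [List.count_nil, List.flatten_nil]; ring
    | cons y ys =>
      simp only [zipLongest, List.foldl_cons, ihx, List.flatten_cons, List.count_append]
      push_cast [List.count_nil, List.flatten_nil]; ring

-- A's dict, read at an in-range key, is the count of that key in the flattened pool
theorem getD_count_numbers (piece snake : List (List Int)) (p : Int)
    (h0 : 0 ≤ p) (h6 : p ≤ 6) :
    (count_numbers piece snake).getD p 0
      = ((piece.flatten ++ snake.flatten).count p : Int) := by
  unfold count_numbers
  rw [getD_foldl_insert_fun]
  have hmem : p ∈ PySem.List.pyRange 0 7 1 := by
    rw [PySem.List.mem_pyRange_one]; omega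
  rw [if_pos hmem, zipLongest_count]
  simp [List.count_append]

-- keys occurring in groupRunsGo come from the current run's key or the rest of the list
theorem groupRunsGo_keys_sub (ys : List Int) (x c k : Int)
    (hk : k ∈ (groupRunsGo x c ys).map Prod.fst) : k = x ∨ k ∈ ys := by
  induction ys generalizing x c with
  | nil => simp [groupRunsGo] at hk; simp [hk]
  | cons y ys ih =>
    rw [groupRunsGo] at hk
    by_cases hyx : y = x
    · subst hyx
      rw [if_pos (by simp)] at hk
      rcases ih y (c + 1) hk with h | h
      · exact Or.inl h
      · exact Or.inr (List.mem_cons_of_mem _ h)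
    · rw [if_neg (by simp [hyx])] at hk
      simp only [List.map_cons, List.mem_cons] at hk
      rcases hk with h | h
      · exact Or.inl h
      · rcases ih y 1 h with h' | h'
        · exact Or.inr (h' ▸ List.mem_cons_self)
        · exact Or.inr (List.mem_cons_of_mem _ h')

-- on a sorted tail, the run keys are strictly increasing (hence nodup)
theorem groupRunsGo_keys_sorted (ys : List Int) (x c : Int)
    (hs : ys.Pairwise (· ≤ ·)) (hx : ∀ y ∈ ys, x ≤ y) :
    ((groupRunsGo x c ys).map Prod.fst).Pairwise (· < ·) := by
  induction ys generalizing x c with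
  | nil => simp [groupRunsGo]
  | cons y ys ih =>
    rw [groupRunsGo]
    rcases List.pairwise_cons.mp hs with ⟨hy, hs'⟩
    by_cases hyx : y = x
    · subst hyx
      rw [if_pos (by simp)]
      exact ih y (c + 1) hs' hy
    · rw [if_neg (by simp [hyx])]
      have hxy : x < y := lt_of_le_of_ne (hx y List.mem_cons_self) (Ne.symm hyx)
      simp only [List.map_cons, List.pairwise_cons]
      refine ⟨?_, ih y 1 hs' hy⟩
      intro k hk
      rcases groupRunsGo_keys_sub ys y 1 k hk with h | h
      · exact h ▸ hxy
      · exact lt_of_lt_of_le hxy (hy k h)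

-- the run list of a sorted tail records, for each key, its total multiplicity
theorem groupRunsGo_find (ys : List Int) (x c k : Int)
    (hs : ys.Pairwise (· ≤ ·)) (hx : ∀ y ∈ ys, x ≤ y) :
    (groupRunsGo x c ys).find? (fun kr => kr.1 == k)
      = if k = x then some (x, c + (ys.count x : Int))
        else if k ∈ ys then some (k, (ys.count k : Int)) else none := by
  induction ys generalizing x c with
  | nil =>
    by_cases hk : k = x
    · simp [groupRunsGo, hk]
    · simp [groupRunsGo, hk, beq_eq_false_iff_ne.mpr (fun h => hk h.symm)]
  | cons y ys ih =>
    rw [groupRunsGo]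
    rcases List.pairwise_cons.mp hs with ⟨hy, hs'⟩
    by_cases hyx : y = x
    · subst hyx
      rw [if_pos (by simp), ih y (c + 1) hs' hy]
      by_cases hk : k = y
      · subst hk
        rw [if_pos rfl, if_pos rfl, List.count_cons_self]
        push_cast; ring_nf
      · rw [if_neg hk, if_neg hk]
        simp only [List.mem_cons, hk, false_or]
        split
        · rw [List.count_cons_of_ne (fun h => hk h.symm)]
        · rfl
    · rw [if_neg (by simp [hyx])]
      have hxy : x < y := lt_of_le_of_ne (hx y List.mem_cons_self) (Ne.symm hyx)
      have hcx : ys.count x = 0 := by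
        rw [List.count_eq_zero]
        intro hmem
        exact absurd (hy x hmem) (not_le.mpr hxy)
      by_cases hk : k = x
      · subst hk
        rw [List.find?_cons_of_pos (by simp), if_pos rfl, List.count_cons_of_ne hyx, hcx]
        simp
      · rw [List.find?_cons_of_neg (by simp; exact fun h => hk h.symm), if_neg hk,
          ih y 1 hs' hy]
        by_cases hky : k = y
        · subst hky
          rw [if_pos rfl, if_pos List.mem_cons_self, List.count_cons_self]
          push_cast; ring_nf
        · rw [if_neg hky]
          simp only [List.mem_cons, hky, false_or]
          split
          · rw [List.count_cons_of_ne (fun h => hky h.symm)]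
          · rfl

-- full runs of a sorted list: find? at k yields k's multiplicity, none if absent
theorem groupRuns_find (l : List Int) (k : Int) (hs : l.Pairwise (· ≤ ·)) :
    (groupRuns l).find? (fun kr => kr.1 == k)
      = if k ∈ l then some (k, (l.count k : Int)) else none := by
  cases l with
  | nil => simp [groupRuns]
  | cons x xs =>
    rcases List.pairwise_cons.mp hs with ⟨hx, hs'⟩
    rw [groupRuns, groupRunsGo_find xs x 1 k hs' hx]
    by_cases hk : k = x
    · subst hk
      rw [if_pos rfl, if_pos List.mem_cons_self, List.count_cons_self]
      push_cast; ring_nf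
    · rw [if_neg hk]
      simp only [List.mem_cons, hk, false_or]
      split
      · rw [List.count_cons_of_ne (fun h => hk h.symm)]
      · rfl

-- keys of the full run list of a sorted list are pairwise distinct
theorem groupRuns_keys_nodup (l : List Int) (hs : l.Pairwise (· ≤ ·)) :
    ((groupRuns l).map Prod.fst).Nodup := by
  cases l with
  | nil => simp [groupRuns]
  | cons x xs =>
    rcases List.pairwise_cons.mp hs with ⟨hx, hs'⟩
    exact (groupRunsGo_keys_sorted xs x 1 hs' hx).nodup

-- the guarded run-recording fold leaves keys not mentioned in the run list alone
theorem getD_guard_fold_not_mem (rs : List (Int × Int)) (d : PySem.Dict Int Int) (k : Int)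
    (hk : ∀ kr ∈ rs, kr.1 ≠ k) :
    (rs.foldl (fun d kr => if d.contains kr.1 then d.insert kr.1 kr.2 else d) d).getD k 0
      = d.getD k 0 := by
  induction rs generalizing d with
  | nil => rfl
  | cons kr rs ih =>
    rw [List.foldl_cons, ih _ (fun kr' h => hk kr' (List.mem_cons_of_mem _ h))]
    by_cases hc : d.contains kr.1
    · rw [if_pos hc, PySem.Dict.getD_insert_of_ne d kr.2 0 (fun h => hk kr List.mem_cons_self h.symm)]
    · rw [if_neg hc]

-- the guarded fold does not change the key set
theorem contains_guard_fold (rs : List (Int × Int)) (d : PySem.Dict Int Int) (q : Int) :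
    (rs.foldl (fun d kr => if d.contains kr.1 then d.insert kr.1 kr.2 else d) d).contains q
      = d.contains q := by
  induction rs generalizing d with
  | nil => rfl
  | cons kr rs ih =>
    rw [List.foldl_cons, ih]
    by_cases hc : d.contains kr.1
    · rw [if_pos hc, PySem.Dict.contains_insert]
      by_cases hq : q = kr.1
      · simp [hq, hc]
      · simp [beq_eq_false_iff_ne.mpr hq]
    · rw [if_neg hc]

-- reading the guarded fold: the run list's (unique) entry for k wins iff k is a key of d
theorem getD_guard_fold (rs : List (Int × Int)) (d : PySem.Dict Int Int) (k : Int)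
    (hnd : (rs.map Prod.fst).Nodup) :
    (rs.foldl (fun d kr => if d.contains kr.1 then d.insert kr.1 kr.2 else d) d).getD k 0
      = match rs.find? (fun kr => kr.1 == k) with
        | some kr => if d.contains k then kr.2 else d.getD k 0
        | none => d.getD k 0 := by
  induction rs generalizing d with
  | nil => rfl
  | cons kr rs ih =>
    rw [List.map_cons, List.nodup_cons] at hnd
    obtain ⟨hout, hnd'⟩ := hnd
    rw [List.foldl_cons]
    by_cases hk : kr.1 = k
    · subst hk
      rw [List.find?_cons_of_pos (by simp)]
      rw [getD_guard_fold_not_mem rs _ kr.1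
          (fun kr' h => fun hc => hout (hc ▸ (List.mem_map_of_mem h : kr'.1 ∈ rs.map Prod.fst)))]
      by_cases hc : d.contains kr.1
      · rw [if_pos hc]; simp [hc, PySem.Dict.getD_insert_self]
      · rw [if_neg hc]; simp [hc]
    · rw [List.find?_cons_of_neg (by simp [hk]), ih _ hnd']
      have hcq : (if d.contains kr.1 then d.insert kr.1 kr.2 else d).contains k = d.contains k := by
        simpa using contains_guard_fold [kr] d k
      have hgq : (if d.contains kr.1 then d.insert kr.1 kr.2 else d).getD k 0 = d.getD k 0 := by
        by_cases hc : d.contains kr.1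
        · rw [if_pos hc, PySem.Dict.getD_insert_of_ne d kr.2 0 (fun h => hk h.symm)]
        · rw [if_neg hc]
      cases hfind : rs.find? (fun kr => kr.1 == k) with
      | some kr' => rw [hcq, hgq]
      | none => rw [hgq]

-- the seed dict {0..6 ↦ 0}: key set and values
theorem contains_seed (d0 : PySem.Dict Int Int) (l : List Int) (q : Int) :
    (l.foldl (fun d i => d.insert i (0 : Int)) d0).contains q
      = (decide (q ∈ l) || d0.contains q) := by
  induction l generalizing d0 with
  | nil => simp
  | cons i l ih =>
    simp only [List.foldl_cons, ih, PySem.Dict.contains_insert, List.mem_cons]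
    by_cases hq : q = i
    · simp [hq]
    · simp [hq, beq_eq_false_iff_ne.mpr hq]

-- B's finished frequency dict, read at an in-range key, is that pip's total count
theorem getD_freq (piece snake : List (List Int)) (p : Int)
    (h0 : 0 ≤ p) (h6 : p ≤ 6) :
    (((groupRuns (PySem.List.sorted ((piece ++ snake).flatten) (fun p => p) false)).foldl
        (fun d kr => if d.contains kr.1 then d.insert kr.1 kr.2 else d)
        ((PySem.List.pyRange 0 7 1).foldl (fun d i => d.insert i (0 : Int)) PySem.Dict.empty))).getD p 0
      = (((piece ++ snake).flatten).count p : Int) := by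
  have hpool : (PySem.List.sorted ((piece ++ snake).flatten) (fun p => p) false).Pairwise (· ≤ ·) :=
    PySem.List.sorted_pairwise _ _
  have hperm := PySem.List.sorted_perm ((piece ++ snake).flatten) (fun p : Int => p) false
  have hcnt : (PySem.List.sorted ((piece ++ snake).flatten) (fun p => p) false).count p
      = ((piece ++ snake).flatten).count p := hperm.count_eq p
  have hmem7 : p ∈ PySem.List.pyRange 0 7 1 := by rw [PySem.List.mem_pyRange_one]; omega
  have hcontains : ((PySem.List.pyRange 0 7 1).foldl (fun d i => d.insert i (0 : Int)) PySem.Dict.empty).contains p = true := by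
    rw [contains_seed]; simp [hmem7]
  have hseed0 : ((PySem.List.pyRange 0 7 1).foldl (fun d i => d.insert i (0 : Int)) PySem.Dict.empty).getD p 0 = 0 := by
    have := getD_foldl_insert_fun (PySem.List.pyRange 0 7 1) (fun _ => (0 : Int)) PySem.Dict.empty p
    simpa [hmem7] using this
  rw [getD_guard_fold _ _ _ (groupRuns_keys_nodup _ hpool),
    groupRuns_find _ p hpool]
  by_cases hmem : p ∈ PySem.List.sorted ((piece ++ snake).flatten) (fun p => p) false
  · rw [if_pos hmem]
    simp only [hcontains, if_true, hcnt]
  · have hc0 : ((piece ++ snake).flatten).count p = 0 := by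
      rw [List.count_eq_zero]
      intro h
      exact hmem ((PySem.List.mem_sorted _ _ _ _).mpr h)
    rw [if_neg hmem, hc0]
    simp [hseed0]

-- ===== VERDICT (by name: the statement is the Claim_ definition above) =====
theorem domino_score_spec : Claim_equal_domino_score := by
  intro piece snake _ hpre
  unfold Spec_domino_score domino_score domino_score_alt
  congr 1
  rw [PySem.List.foldl_append_singleton_eq_map, List.nil_append]
  refine List.map_congr_left ?_
  intro domino hdom
  refine Prod.ext ?_ rfl
  dsimp only
  refine PySem.List.foldl_congr_mem' domino _ _ 0 ?_
  intro p hp acc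
  rw [getD_count_numbers piece snake p (hpre domino hdom p hp).1 (hpre domino hdom p hp).2,
    getD_freq piece snake p (hpre domino hdom p hp).1 (hpre domino hdom p hp).2,
    List.flatten_append]
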